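-- pv_equiv track=rewrite | github.com/McCarryster/llm_rl_fine_tune | src/data_work/prepare_sft_data.py | split_into_turns
-- ===== SOURCE A (Python) =====
-- def split_into_turns(sample):
--     """Split a full conversation into individual turn datapoints."""
--     text = sample["chosen"]
--     datapoints = []
--
--     # Split on Human turns
--     # Each datapoint = prior context (prompt) + one assistant response
--     segments = text.split("\n\nHuman: ")
--     segments = [s for s in segments if s.strip()]  # remove empty
--
--     context = ""
--     for segment in segments:
--         if "\n\nAssistant: " in segment:
--             human_part, assistant_part = segment.split("\n\nAssistant: ", 1)
--
--             # Build the full datapoint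
--             full_turn = context + "\n\nHuman: " + human_part + "\n\nAssistant: " + assistant_part
--             datapoints.append({"text": full_turn})
--
--             # Update context for next turn
--             context = full_turn
--
--     return datapoints
-- ===== SOURCE B (Python) =====
-- def _piece_of(segment):
--     """Return this segment's turn piece, or None if it contributes nothing."""
--     if not segment.strip():
--         return None
--     marker = "\n\nAssistant: "
--     if marker not in segment:
--         return None
--     human_part, assistant_part = segment.split(marker, 1)
--     return "\n\nHuman: " + human_part + marker + assistant_part
--
--
-- def split_into_turns(sample):
--     """Split a full conversation into individual turn datapoints.
--
--     Map-then-filter collects each turn's piece; a second pass rebuilds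
--     every cumulative datapoint text by joining a prefix of the pieces.
--     """
--     pieces = [p for p in map(_piece_of, sample["chosen"].split("\n\nHuman: "))
--               if p is not None]
--     return [{"text": "".join(pieces[:i + 1])} for i in range(len(pieces))]
-- ===== Notes on version B (the rewrite author's own statement) =====
-- stated objective: alternative
-- what changed: Replaces A's single accumulator-threading loop (a running context string carried through the fold) with a map/filter pass that collects each turn's piece via an option-returning helper, then a second pass that rebuilds every datapoint text by joining a prefix of the piece list.
import Mathlib
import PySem

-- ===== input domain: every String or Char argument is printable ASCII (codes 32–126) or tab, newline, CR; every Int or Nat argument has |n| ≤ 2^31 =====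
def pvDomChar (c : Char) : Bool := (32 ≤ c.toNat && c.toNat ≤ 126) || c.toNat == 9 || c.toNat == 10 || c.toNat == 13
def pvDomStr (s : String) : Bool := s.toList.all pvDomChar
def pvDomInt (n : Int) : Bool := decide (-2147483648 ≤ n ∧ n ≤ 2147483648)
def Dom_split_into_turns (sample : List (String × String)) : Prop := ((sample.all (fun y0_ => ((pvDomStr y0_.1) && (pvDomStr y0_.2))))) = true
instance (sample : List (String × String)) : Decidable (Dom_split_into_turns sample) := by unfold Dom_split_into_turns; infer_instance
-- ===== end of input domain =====

-- B replaces A's running-context accumulator loop with a map/filter piece-collecting pass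
-- plus prefix-joins (same outputs); agreement is proved on samples carrying a "chosen" key.

-- ===== PORT A =====
-- loop body of A's for-loop, named so the proofs can speak about it
def pvStepA (st : List (List (String × String)) × List Char) (segment : List Char) :
    List (List (String × String)) × List Char :=
  if PySem.Chars.isIn "\n\nAssistant: ".toList segment then
    match PySem.Chars.splitOnMax segment "\n\nAssistant: ".toList 1 with
    | human_part :: assistant_part :: _ =>
      let full_turn := st.2 ++ "\n\nHuman: ".toList ++ human_part ++
        "\n\nAssistant: ".toList ++ assistant_part
      (st.1 ++ [[("text", String.ofList full_turn)]], full_turn)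
    | _ => st
  else st

def split_into_turns (sample : List (String × String)) : List (List (String × String)) :=
  let text := (PySem.Dict.getD (PySem.Dict.mk sample) "chosen" "").toList
  let segments := PySem.Chars.splitOn text "\n\nHuman: ".toList
  let segments := segments.filter (fun s => !(PySem.Chars.strip s).isEmpty)
  (segments.foldl pvStepA ([], [])).1

-- ===== PORT B =====
-- B's option-returning helper _piece_of
def pvPieceOf (segment : List Char) : Option (List Char) :=
  if (PySem.Chars.strip segment).isEmpty then none
  else if PySem.Chars.isIn "\n\nAssistant: ".toList segment then
    match PySem.Chars.splitOnMax segment "\n\nAssistant: ".toList 1 with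
    | human_part :: assistant_part :: _ =>
      some ("\n\nHuman: ".toList ++ human_part ++ "\n\nAssistant: ".toList ++ assistant_part)
    | _ => none
  else none

def split_into_turns_alt (sample : List (String × String)) : List (List (String × String)) :=
  let text := (PySem.Dict.getD (PySem.Dict.mk sample) "chosen" "").toList
  let pieces := (PySem.Chars.splitOn text "\n\nHuman: ".toList).filterMap pvPieceOf
  (List.range pieces.length).map
    (fun i => [("text", String.ofList (PySem.Chars.join [] (pieces.take (i + 1))))])

-- ===== PRECONDITION & SPEC =====
-- Pre_ excludes only samples without a "chosen" key, on which the Python A raises KeyError.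
def Pre_split_into_turns (sample : List (String × String)) : Prop :=
  PySem.Dict.contains (PySem.Dict.mk sample) "chosen" = true
instance (sample : List (String × String)) : Decidable (Pre_split_into_turns sample) := by
  unfold Pre_split_into_turns; infer_instance

def pvWitness_split_into_turns : (List (String × String)) := ([("chosen", "")])

def Spec_split_into_turns (sample : List (String × String)) (out : List (List (String × String))) : Prop := out = split_into_turns_alt sample
instance (sample : List (String × String)) (out : List (List (String × String))) : Decidable (Spec_split_into_turns sample out) := by unfold Spec_split_into_turns; infer_instance

-- ===== CLAIM (what is proved, stated in full; the proofs are below) =====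
def Claim_equal_split_into_turns : Prop := ∀ (sample : List (String × String)), Dom_split_into_turns sample → Pre_split_into_turns sample → Spec_split_into_turns sample (split_into_turns sample)

-- ===== LEMMAS AND PROOFS =====

-- the piece contributed by one segment, ignoring the strip filter
def pvPiece (seg : List Char) : Option (List Char) :=
  if PySem.Chars.isIn "\n\nAssistant: ".toList seg then
    match PySem.Chars.splitOnMax seg "\n\nAssistant: ".toList 1 with
    | h :: a :: _ => some ("\n\nHuman: ".toList ++ h ++ "\n\nAssistant: ".toList ++ a)
    | _ => none
  else none

-- cumulative concatenations of the pieces, starting from context c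
def pvCumul (c : List Char) : List (List Char) → List (List Char)
  | [] => []
  | p :: ps => (c ++ p) :: pvCumul (c ++ p) ps

lemma pvStepA_eq (st : List (List (String × String)) × List Char) (seg : List Char) :
    pvStepA st seg = match pvPiece seg with
      | some p => (st.1 ++ [[("text", String.ofList (st.2 ++ p))]], st.2 ++ p)
      | none => st := by
  unfold pvStepA pvPiece
  split_ifs with h
  · cases hs : PySem.Chars.splitOnMax seg "\n\nAssistant: ".toList 1 with
    | nil => simp
    | cons x t =>
      cases t with
      | nil => simp
      | cons y t' => simp [List.append_assoc]
  · rfl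

lemma pvPieceOf_eq (seg : List Char) :
    pvPieceOf seg = if (PySem.Chars.strip seg).isEmpty then none else pvPiece seg := by
  unfold pvPieceOf pvPiece
  split_ifs <;> rfl

lemma pvFoldA (segs : List (List Char)) :
    ∀ (acc : List (List (String × String))) (c : List Char),
    segs.foldl pvStepA (acc, c) =
      (acc ++ (pvCumul c (segs.filterMap pvPiece)).map (fun t => [("text", String.ofList t)]),
       c ++ (segs.filterMap pvPiece).flatten) := by
  induction segs with
  | nil => intro acc c; simp [pvCumul]
  | cons s segs ih =>
    intro acc c
    simp only [List.foldl_cons, List.filterMap_cons, pvStepA_eq]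
    cases h : pvPiece s with
    | none => simp [ih]
    | some p => simp [ih, pvCumul, List.append_assoc]

lemma pvFilter_filterMap (segs : List (List Char)) :
    (segs.filter (fun s => !(PySem.Chars.strip s).isEmpty)).filterMap pvPiece =
      segs.filterMap pvPieceOf := by
  rw [List.filterMap_filter]
  congr 1
  funext s
  rw [pvPieceOf_eq]
  cases h : (PySem.Chars.strip s).isEmpty <;> simp_all

lemma pvJoin_nil_eq_flatten (l : List (List Char)) : PySem.Chars.join [] l = l.flatten := by
  simp only [PySem.Chars.join, List.intercalate]
  induction l with
  | nil => rfl
  | cons x xs ih =>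
    cases xs with
    | nil => simp
    | cons y ys => simp_all [List.intersperse]

lemma pvCumul_prefix (ps : List (List Char)) : ∀ c : List Char,
    (List.range ps.length).map (fun i => [("text", String.ofList (c ++ (ps.take (i + 1)).flatten))]) =
      (pvCumul c ps).map (fun t => [("text", String.ofList t)]) := by
  induction ps with
  | nil => intro c; simp [pvCumul]
  | cons p ps ih =>
    intro c
    simp only [List.length_cons, List.range_succ_eq_map, List.map_cons, List.map_map, pvCumul]
    congr 1
    · simp
    · rw [← ih (c ++ p)]
      congr 1
      funext i
      simp [Function.comp, List.append_assoc]

-- ===== VERDICT (by name: the statement is the Claim_ definition above) =====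
theorem split_into_turns_spec : Claim_equal_split_into_turns := by
  intro sample _ _
  unfold Spec_split_into_turns split_into_turns split_into_turns_alt
  simp only [← pvFilter_filterMap, pvFoldA, List.nil_append, pvJoin_nil_eq_flatten]
  rw [← pvCumul_prefix]
  simp
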